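-- pv_equiv track=rewrite | github.com/StBinge/leetcode | LCP 40.心算挑战.py | maxmiumScore
-- ===== SOURCE A (Python) =====
-- from typing import List
--
-- def maxmiumScore(cards: List[int], cnt: int) -> int:
--     cards.sort(reverse=True)
--     s=sum(cards[:cnt])
--     if s&1==0:
--         return s
--
--     ret=0
--     x=cards[cnt-1]
--     for n in cards[cnt:]:
--         if n&1 != x&1:
--             ret=s+n-x
--             break
--     for n in cards[cnt-1::-1]:
--         if n&1 != x&1:
--             for nn in cards[cnt:]:
--                 if n&1 !=nn&1:
--                     ret=max(ret,s-n+nn)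
--                     return ret
--     return ret
-- ===== SOURCE B (Python) =====
-- from typing import List
--
-- def maxmiumScore(cards: List[int], cnt: int) -> int:
--     # Pick j odd cards and m-j even cards (j even => even total); best such sum
--     # is max over j of the prefix sums of the descending-sorted parity classes.
--     m = len(cards[:cnt])
--     odds = sorted((c for c in cards if c % 2 != 0), reverse=True)
--     evens = sorted((c for c in cards if c % 2 == 0), reverse=True)
--     po = [0]
--     for v in odds:
--         po.append(po[-1] + v)
--     pe = [0]
--     for v in evens:
--         pe.append(pe[-1] + v)
--     best = None
--     for j in range(m + 1):
--         if j % 2 == 0 and j < len(po) and m - j < len(pe):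
--             t = po[j] + pe[m - j]
--             if best is None or t > best:
--                 best = t
--     return best if best is not None else 0
-- ===== Notes on version B (the rewrite author's own statement) =====
-- stated objective: alternative
-- what changed: Instead of A's sort-take-top-cnt plus break-driven parity-swap repair scans, B partitions the cards into odd and even classes sorted descending, builds their prefix sums, and maximizes po[j]+pe[m-j] over even counts j of odd cards -- no swap logic at all.
-- intended difference: On inputs where the top-cnt sum is odd, all remaining cards share the parity of the smallest chosen card, and the only parity-fixing swap makes the total negative, A returns 0 (its ret variable starts at 0 because the first swap kind is unavailable) while B returns the attainable negative maximum even total; B's value is intended since A itself returns negative totals whenever the first swap kind is the available one. — e.g. on maxmiumScore([-1, -2, -2], 2): A returns 0, B returns -4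
import Mathlib
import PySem

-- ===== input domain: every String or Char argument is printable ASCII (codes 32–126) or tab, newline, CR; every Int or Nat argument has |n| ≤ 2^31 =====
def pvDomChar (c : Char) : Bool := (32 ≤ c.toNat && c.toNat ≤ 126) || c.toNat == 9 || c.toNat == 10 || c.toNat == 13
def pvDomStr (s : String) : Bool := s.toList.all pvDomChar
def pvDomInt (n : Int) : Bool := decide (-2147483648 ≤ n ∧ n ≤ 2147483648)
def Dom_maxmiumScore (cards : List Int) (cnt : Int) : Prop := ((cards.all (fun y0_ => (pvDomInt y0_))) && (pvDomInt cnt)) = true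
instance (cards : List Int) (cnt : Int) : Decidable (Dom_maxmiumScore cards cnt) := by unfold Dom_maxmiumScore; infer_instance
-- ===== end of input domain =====

-- B drops A's parity-swap repair scans entirely: it partitions the cards into descending-sorted odd
-- and even classes, builds their prefix sums, and maximizes po[j]+pe[m-j] over even odd-counts j
-- (objective: alternative algorithm).  NOTE: A sorts `cards` in place; the equivalence proved here
-- is about the RETURN value only (B does not mutate its argument).

-- ===== PORT A =====
-- first n in l with n&1 != x&1 (A's break loops)
def pvFindOpp (x : Int) : List Int → Option Int
  | [] => none
  | n :: t => if PySem.Int.band n 1 ≠ PySem.Int.band x 1 then some n else pvFindOpp x t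

-- A's second for-loop: on the first n with n&1 != x&1, scan rest for nn with n&1 != nn&1;
-- on success return max ret (s-n+nn), otherwise continue the outer loop
def pvLoop2 (x s ret : Int) (rest : List Int) : List Int → Int
  | [] => ret
  | n :: t =>
    if PySem.Int.band n 1 ≠ PySem.Int.band x 1 then
      match pvFindOpp n rest with
      | some nn => max ret (s - n + nn)
      | none => pvLoop2 x s ret rest t
    else pvLoop2 x s ret rest t

def maxmiumScore (cards : List Int) (cnt : Int) : Int :=
  let d := PySem.List.sorted cards (fun c => c) true
  let s := (PySem.List.slice d none (some cnt)).sum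
  if PySem.Int.band s 1 = 0 then s
  else
    let x := PySem.List.pyGetD d (cnt - 1) 0   -- cards[cnt-1]; in range whenever the branch is reached inside Pre_
    let ret := match pvFindOpp x (PySem.List.slice d (some cnt) none) with
      | some n => s + n - x
      | none => 0
    pvLoop2 x s ret (PySem.List.slice d (some cnt) none)
      ((PySem.List.slice? d (some (cnt - 1)) none (-1)).getD [])   -- cards[cnt-1::-1]

-- ===== PORT B =====
-- po = [0]; for v in l: po.append(po[-1] + v)
def pvPrefix (l : List Int) : List Int :=
  l.foldl (fun acc v => acc ++ [acc.getLastD 0 + v]) [0]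

def maxmiumScore_alt (cards : List Int) (cnt : Int) : Int :=
  let m : Int := ((PySem.List.slice cards none (some cnt)).length : Int)
  let odds := PySem.List.sorted (cards.filter (fun c => PySem.Int.mod c 2 ≠ 0)) (fun c => c) true
  let evens := PySem.List.sorted (cards.filter (fun c => PySem.Int.mod c 2 = 0)) (fun c => c) true
  let po := pvPrefix odds
  let pe := pvPrefix evens
  let best := (PySem.List.pyRange 0 (m + 1) 1).foldl (fun best j =>
    if PySem.Int.mod j 2 = 0 ∧ j < (po.length : Int) ∧ m - j < (pe.length : Int) then
      let t := PySem.List.pyGetD po j 0 + PySem.List.pyGetD pe (m - j) 0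
      match best with
      | none => some t
      | some b => if t > b then some t else some b
    else best) none
  match best with
  | some b => b
  | none => 0

-- ===== PRECONDITION & SPEC =====
-- Pre_ excludes exactly the inputs on which A raises IndexError at cards[cnt-1]:
-- cnt > len(cards) together with an odd total of all cards.
def Pre_maxmiumScore (cards : List Int) (cnt : Int) : Prop :=
  cnt ≤ (cards.length : Int) ∨ PySem.Int.mod cards.sum 2 = 0
instance (cards : List Int) (cnt : Int) : Decidable (Pre_maxmiumScore cards cnt) := by
  unfold Pre_maxmiumScore; infer_instance

def pvWitness_maxmiumScore : List Int × Int := ([1, 2], 1)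

-- On inputs where the top-cnt sum is odd, every remaining card has the same parity as the smallest
-- chosen card, and the only possible parity-fixing swap drops the total below zero, A returns 0
-- (its `ret` starts at 0 because the first swap kind is unavailable) while B returns the attainable
-- (negative) maximum even total — the intended value, and the one A itself returns when the first
-- swap kind is the available one.
def D_maxmiumScore (cards : List Int) (cnt : Int) : Prop :=
  let d := PySem.List.sorted cards (fun c => c) true
  let m := (if cnt < 0 then cnt + cards.length else cnt).toNat
  let ch := d.take m
  let rs := d.drop m
  let x := ch.getLastD 0
  let opp := ch.filter (fun c => c % 2 ≠ x % 2)
  ch.sum % 2 = 1 ∧ rs ≠ [] ∧ (∀ r ∈ rs, r % 2 = x % 2) ∧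
  opp ≠ [] ∧ ch.sum - opp.getLastD 0 + rs.headD 0 < 0
instance (cards : List Int) (cnt : Int) : Decidable (D_maxmiumScore cards cnt) := by
  unfold D_maxmiumScore; infer_instance

def Spec_maxmiumScore (cards : List Int) (cnt : Int) (out : Int) : Prop :=
  ¬ D_maxmiumScore cards cnt → out = maxmiumScore_alt cards cnt
instance (cards : List Int) (cnt : Int) (out : Int) : Decidable (Spec_maxmiumScore cards cnt out) := by
  unfold Spec_maxmiumScore; infer_instance

def pvDiffWitness_maxmiumScore : List Int × Int := ([-1, -2, -2], 2)
def pvDiffWitnessOut_maxmiumScore : Int × Int := (0, -4)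

-- ===== CLAIM (what is proved, stated in full; the proofs are below) =====
def Claim_unchanged_maxmiumScore : Prop := ∀ (cards : List Int) (cnt : Int), Dom_maxmiumScore cards cnt → Pre_maxmiumScore cards cnt → Spec_maxmiumScore cards cnt (maxmiumScore cards cnt)
def Claim_changed_maxmiumScore : Prop := Dom_maxmiumScore (pvDiffWitness_maxmiumScore.1) (pvDiffWitness_maxmiumScore.2) ∧ Pre_maxmiumScore (pvDiffWitness_maxmiumScore.1) (pvDiffWitness_maxmiumScore.2) ∧ D_maxmiumScore (pvDiffWitness_maxmiumScore.1) (pvDiffWitness_maxmiumScore.2) ∧ maxmiumScore (pvDiffWitness_maxmiumScore.1) (pvDiffWitness_maxmiumScore.2) = pvDiffWitnessOut_maxmiumScore.1 ∧ maxmiumScore_alt (pvDiffWitness_maxmiumScore.1) (pvDiffWitness_maxmiumScore.2) = pvDiffWitnessOut_maxmiumScore.2 ∧ pvDiffWitnessOut_maxmiumScore.1 ≠ pvDiffWitnessOut_maxmiumScore.2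
def Claim_exact_maxmiumScore : Prop := ∀ (cards : List Int) (cnt : Int), Dom_maxmiumScore cards cnt → Pre_maxmiumScore cards cnt → D_maxmiumScore cards cnt → maxmiumScore cards cnt ≠ maxmiumScore_alt cards cnt
-- ===== LEMMAS AND PROOFS =====

-- n & 1 is n % 2 (floor mod)
lemma pvBandOne (z : Int) : PySem.Int.band z 1 = z % 2 := by
  rw [PySem.Int.band_one, PySem.Int.mod_eq_emod_of_pos (by norm_num)]

lemma pvModTwo (z : Int) : PySem.Int.mod z 2 = z % 2 :=
  PySem.Int.mod_eq_emod_of_pos (by norm_num)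

-- A's break loops are find-first
lemma pvFindOpp_eq (x : Int) (l : List Int) :
    pvFindOpp x l = l.find? (fun n => n % 2 != x % 2) := by
  induction l with
  | nil => simp [pvFindOpp]
  | cons n t ih =>
    by_cases h : n % 2 = x % 2 <;> simp [pvFindOpp, pvBandOne, h, ih]

lemma pvParityFun (n2 n : Int) (h : n2 % 2 = n % 2) :
    (fun nn : Int => nn % 2 != n2 % 2) = (fun nn : Int => nn % 2 != n % 2) := by
  funext nn; rw [h]

-- A's second loop: the first opposite-parity chosen card decides the outcome
lemma pvLoop2_eq (x s ret : Int) (rest : List Int) (l : List Int) :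
    pvLoop2 x s ret rest l =
      match l.find? (fun n => n % 2 != x % 2) with
      | none => ret
      | some n2 =>
        match rest.find? (fun nn => nn % 2 != n2 % 2) with
        | some nn => max ret (s - n2 + nn)
        | none => ret := by
  induction l with
  | nil => simp [pvLoop2]
  | cons n t ih =>
    by_cases h : n % 2 = x % 2
    · rw [List.find?_cons_of_neg (p := fun n : Int => n % 2 != x % 2) (h := by simpa using h)]
      simpa [pvLoop2, pvBandOne, h] using ih
    · rw [List.find?_cons_of_pos (p := fun n : Int => n % 2 != x % 2) (h := by simpa using h)]
      have hb : ¬ PySem.Int.band n 1 = PySem.Int.band x 1 := by simpa [pvBandOne] using h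
      show (if PySem.Int.band n 1 ≠ PySem.Int.band x 1 then
          match pvFindOpp n rest with
          | some nn => max ret (s - n + nn)
          | none => pvLoop2 x s ret rest t
        else pvLoop2 x s ret rest t) = _
      rw [if_pos hb, pvFindOpp_eq]
      cases hnn : rest.find? (fun nn => nn % 2 != n % 2) with
      | some nn => simp [hnn]
      | none =>
        rw [ih]
        cases ht : t.find? (fun n' => n' % 2 != x % 2) with
        | none => simp [hnn]
        | some n2 =>
          have hn2 := List.find?_some ht
          have heq : n2 % 2 = n % 2 := by
            have d1 := Int.emod_two_eq n
            have d2 := Int.emod_two_eq n2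
            have d3 := Int.emod_two_eq x
            simp only [bne_iff_ne, ne_eq] at hn2
            omega
          simp only [pvParityFun n2 n heq, hnn]

-- cards[cnt-1::-1] is the reverse of the chosen prefix
lemma pvMapRev (xs : List Int) (m : Nat) (h : m < xs.length) :
    (List.range (m + 1)).map (fun k => xs.getD (m - k) 0) = (List.take (m + 1) xs).reverse := by
  apply List.ext_getElem
  · simp; omega
  · intro i h1 h2
    simp only [List.getElem_map, List.getElem_range, List.getElem_reverse, List.getElem_take]
    rw [List.getD_eq_getElem]
    · congr 1
      simp at h2 ⊢
      omega
    · simp at h1 ⊢; omega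

lemma pvSliceRev (xs : List Int) (a : Int) (h0 : 0 ≤ a) (h2 : a < (xs.length : Int)) :
    PySem.List.slice? xs (some a) none (-1) = some ((xs.take (a.toNat + 1)).reverse) := by
  unfold PySem.List.slice? PySem.List.sliceIndices
  norm_num
  rw [if_neg (by omega), min_eq_left (by omega), if_pos (by omega)]
  rw [List.filterMap_congr (g := fun k : Nat => some (xs.getD (a.toNat - k) 0))]
  · rw [List.filterMap_eq_map_iff_forall_eq_some.mpr (fun x _ => rfl)]
    have h3 : (a + 1).toNat = a.toNat + 1 := by omega
    rw [h3, pvMapRev xs a.toNat (by omega)]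
  · intro k hk
    simp only [List.mem_range] at hk
    have hkk : (a + -(k : Int)).toNat = a.toNat - k := by omega
    rw [hkk, List.getElem?_eq_getElem (by omega), List.getD_eq_getElem _ _ (by omega)]

-- canonical form of port A in the odd branch
def pvA2 (ch rest : List Int) (x s : Int) : Int :=
  let ret := match rest.find? (fun n => n % 2 != x % 2) with
    | some n => s + n - x
    | none => 0
  match ch.reverse.find? (fun n => n % 2 != x % 2) with
  | none => ret
  | some n2 =>
    match rest.find? (fun nn => nn % 2 != n2 % 2) with
    | some nn => max ret (s - n2 + nn)
    | none => ret

-- two-candidate form of the B value (proof layer; the endpoint swaps of the parity classes)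
def pvB2 (ch rest : List Int) (s : Int) : Int :=
  match PySem.List.max?
      ((match (ch.filter (fun c => PySem.Int.mod c 2 ≠ 0)).getLast?,
              (rest.filter (fun c => PySem.Int.mod c 2 = 0)).head? with
        | some a, some b => [s - a + b]
        | _, _ => ([] : List Int)) ++
       (match (ch.filter (fun c => PySem.Int.mod c 2 = 0)).getLast?,
              (rest.filter (fun c => PySem.Int.mod c 2 ≠ 0)).head? with
        | some a, some b => [s - a + b]
        | _, _ => ([] : List Int))) (fun c => c) with
  | some m => m
  | none => 0

-- % form of D_'s core
def pvDcore (ch rest : List Int) : Prop :=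
  ch.sum % 2 = 1 ∧ rest ≠ [] ∧
  (∀ r ∈ rest, r % 2 = (ch.getLastD 0) % 2) ∧
  ch.filter (fun c => c % 2 != (ch.getLastD 0) % 2) ≠ [] ∧
  ch.sum - (ch.filter (fun c => c % 2 != (ch.getLastD 0) % 2)).getLastD 0 + rest.headD 0 < 0

lemma pvChosen_ne_nil {ch : List Int} (hodd : ch.sum % 2 = 1) : ch ≠ [] := by
  intro h; rw [h] at hodd; simp at hodd

-- negative-slice forms (Python's negative indices/bounds)
lemma pvSliceToNeg (xs : List Int) (b : Int) (hb : b < 0) :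
    PySem.List.slice xs none (some b) = xs.take (b + xs.length).toNat := by
  have h : b = -(((-b).toNat : Nat) : Int) := by omega
  rw [h, PySem.List.slice_to_neg_natCast xs (-b).toNat (by omega)]
  congr 1
  omega

lemma pvSliceFromNeg (xs : List Int) (a : Int) (ha : a < 0) :
    PySem.List.slice xs (some a) none = xs.drop (a + xs.length).toNat := by
  have h : a = -(((-a).toNat : Nat) : Int) := by omega
  rw [h, PySem.List.slice_from_neg_natCast xs (-a).toNat (by omega)]
  congr 1
  omega

lemma pvSliceRevNeg (xs : List Int) (a : Int) (ha : a < 0) (h : 0 ≤ a + (xs.length : Int)) :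
    PySem.List.slice? xs (some a) none (-1) = some ((xs.take ((a + xs.length).toNat + 1)).reverse) := by
  unfold PySem.List.slice? PySem.List.sliceIndices
  norm_num
  rw [if_pos (by omega), max_eq_left (by omega), if_pos (by omega)]
  rw [List.filterMap_congr (g := fun k : Nat => some (xs.getD ((a + xs.length).toNat - k) 0))]
  · rw [List.filterMap_eq_map_iff_forall_eq_some.mpr (fun x _ => rfl)]
    have h3 : (a + xs.length + 1).toNat = (a + xs.length).toNat + 1 := by omega
    rw [h3, pvMapRev xs (a + xs.length).toNat (by omega)]
  · intro k hk
    simp only [List.mem_range] at hk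
    have hkk : (a + xs.length + -(k : Int)).toNat = (a + xs.length).toNat - k := by omega
    rw [hkk, List.getElem?_eq_getElem (by omega), List.getD_eq_getElem _ _ (by omega)]

-- last of the chosen prefix
lemma pvTakeLast (d : List Int) (M : Nat) (h1 : 1 ≤ M) (h2 : M ≤ d.length) :
    (d.take M).getLastD 0 = d[M - 1]'(by omega) := by
  have hlen : (d.take M).length = M := by rw [List.length_take]; omega
  rw [List.getLastD_eq_getLast?, List.getLast?_eq_getElem?, hlen, List.getElem?_take,
    if_pos (by omega), List.getElem?_eq_getElem (by omega)]
  rfl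

-- reduction of port A to pvA2, for any prefix length M realising the Python slices
lemma pvA_evalM (cards : List Int) (cnt : Int) (M : Nat)
    (hM1 : PySem.List.slice (PySem.List.sorted cards (fun c => c) true) none (some cnt) =
      (PySem.List.sorted cards (fun c => c) true).take M)
    (hM2 : PySem.List.slice (PySem.List.sorted cards (fun c => c) true) (some cnt) none =
      (PySem.List.sorted cards (fun c => c) true).drop M)
    (hx : PySem.List.pyGetD (PySem.List.sorted cards (fun c => c) true) (cnt - 1) 0 =
      ((PySem.List.sorted cards (fun c => c) true).take M).getLastD 0)
    (hrev : (PySem.List.slice? (PySem.List.sorted cards (fun c => c) true) (some (cnt - 1)) none (-1)).getD [] =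
      ((PySem.List.sorted cards (fun c => c) true).take M).reverse)
    (hodd : ((PySem.List.sorted cards (fun c => c) true).take M).sum % 2 = 1) :
    maxmiumScore cards cnt =
      pvA2 ((PySem.List.sorted cards (fun c => c) true).take M)
        ((PySem.List.sorted cards (fun c => c) true).drop M)
        (((PySem.List.sorted cards (fun c => c) true).take M).getLastD 0)
        ((PySem.List.sorted cards (fun c => c) true).take M).sum := by
  set d := PySem.List.sorted cards (fun c => c) true with hd
  show (let d' := d
    let s := (PySem.List.slice d' none (some cnt)).sum
    if PySem.Int.band s 1 = 0 then s
    else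
      let x := PySem.List.pyGetD d' (cnt - 1) 0
      let ret := match pvFindOpp x (PySem.List.slice d' (some cnt) none) with
        | some n => s + n - x
        | none => 0
      pvLoop2 x s ret (PySem.List.slice d' (some cnt) none)
        ((PySem.List.slice? d' (some (cnt - 1)) none (-1)).getD [])) = _
  simp only [hM1, hM2]
  rw [if_neg (by rw [pvBandOne]; omega)]
  rw [hx, hrev, pvFindOpp_eq, pvLoop2_eq]
  rfl

-- the two instantiations: 0 ≤ cnt ≤ len, and cnt < 0 (Python's wraparound prefix)
lemma pvA_evalPos (cards : List Int) (cnt : Int) (h0 : 0 ≤ cnt) (h1 : cnt ≤ (cards.length : Int))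
    (hodd : ((PySem.List.sorted cards (fun c => c) true).take cnt.toNat).sum % 2 = 1) :
    maxmiumScore cards cnt =
      pvA2 ((PySem.List.sorted cards (fun c => c) true).take cnt.toNat)
        ((PySem.List.sorted cards (fun c => c) true).drop cnt.toNat)
        (((PySem.List.sorted cards (fun c => c) true).take cnt.toNat).getLastD 0)
        ((PySem.List.sorted cards (fun c => c) true).take cnt.toNat).sum := by
  have hlen : (PySem.List.sorted cards (fun c => c) true).length = cards.length :=
    PySem.List.length_sorted cards (fun c => c) true
  set d := PySem.List.sorted cards (fun c => c) true with hd
  have hdl : cnt ≤ (d.length : Int) := by rw [hlen]; exact h1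
  have hchne : d.take cnt.toNat ≠ [] := pvChosen_ne_nil hodd
  have hcnt1 : 1 ≤ cnt := by
    by_contra hc
    have h : cnt.toNat = 0 := by omega
    exact hchne (by rw [h, List.take_zero])
  refine pvA_evalM cards cnt cnt.toNat (PySem.List.slice_to _ h0) (PySem.List.slice_from _ h0) ?_ ?_ hodd
  · rw [PySem.List.pyGetD_eq_getElem d 0 (by omega) (by omega),
      pvTakeLast d cnt.toNat (by omega) (by omega)]
    congr 1
    omega
  · have hn1 : (cnt - 1).toNat + 1 = cnt.toNat := by omega
    rw [pvSliceRev d (cnt - 1) (by omega) (by omega), hn1]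
    rfl

lemma pvA_evalNeg (cards : List Int) (cnt : Int) (h2 : cnt < 0)
    (hodd : ((PySem.List.sorted cards (fun c => c) true).take (cnt + cards.length).toNat).sum % 2 = 1) :
    maxmiumScore cards cnt =
      pvA2 ((PySem.List.sorted cards (fun c => c) true).take (cnt + cards.length).toNat)
        ((PySem.List.sorted cards (fun c => c) true).drop (cnt + cards.length).toNat)
        (((PySem.List.sorted cards (fun c => c) true).take (cnt + cards.length).toNat).getLastD 0)
        ((PySem.List.sorted cards (fun c => c) true).take (cnt + cards.length).toNat).sum := by
  have hlen : (PySem.List.sorted cards (fun c => c) true).length = cards.length :=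
    PySem.List.length_sorted cards (fun c => c) true
  set d := PySem.List.sorted cards (fun c => c) true with hd
  have hdl : (d.length : Int) = cards.length := by rw [hlen]
  have hchne : d.take (cnt + cards.length).toNat ≠ [] := pvChosen_ne_nil hodd
  have hM1 : 1 ≤ (cnt + cards.length).toNat := by
    by_contra hc
    have h : (cnt + cards.length).toNat = 0 := by omega
    exact hchne (by rw [h, List.take_zero])
  have hMlen : (cnt + cards.length).toNat ≤ d.length := by omega
  refine pvA_evalM cards cnt (cnt + cards.length).toNat ?_ ?_ ?_ ?_ hodd
  · rw [pvSliceToNeg d cnt h2]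
    congr 2
    omega
  · rw [pvSliceFromNeg d cnt h2]
    congr 2
    omega
  · have hneg : cnt - 1 = -(((1 - cnt).toNat : Nat) : Int) := by omega
    rw [hneg, PySem.List.pyGetD_neg_natCast d (1 - cnt).toNat 0 (by omega) (by omega),
      pvTakeLast d (cnt + cards.length).toNat hM1 hMlen]
    congr 1
    omega
  · have hn1 : (cnt - 1 + (d.length : Int)).toNat + 1 = (cnt + cards.length).toNat := by omega
    rw [pvSliceRevNeg d (cnt - 1) (by omega) (by omega), hn1]
    rfl

-- Bool parity predicates (proof layer)
def pOdd : Int → Bool := fun c => c % 2 != 0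
def pEven : Int → Bool := fun c => c % 2 == 0

lemma pvPredOddB : (fun c : Int => decide (PySem.Int.mod c 2 ≠ 0)) = pOdd := by
  funext c; by_cases h : c % 2 = 0 <;> simp [pOdd, pvModTwo, h]
lemma pvPredEvenB : (fun c : Int => decide (PySem.Int.mod c 2 = 0)) = pEven := by
  funext c; by_cases h : c % 2 = 0 <;> simp [pEven, pvModTwo, h]
lemma pvPredNe1 : (fun n : Int => n % 2 != 1) = pEven := by
  funext n
  have := Int.emod_two_eq n
  rcases this with h | h <;> simp [pEven, h]
lemma pvPredX (x : Int) (hx : x % 2 = 1) :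
    (fun n : Int => n % 2 != x % 2) = pEven := by rw [hx]; exact pvPredNe1
lemma pvPredX0 (x : Int) (hx : x % 2 = 0) :
    (fun n : Int => n % 2 != x % 2) = pOdd := by rw [hx]; rfl

lemma pvFilterLast (l : List Int) (p : Int → Bool) :
    (l.filter p).getLast? = l.reverse.find? p := by
  rw [← List.head?_reverse, ← List.filter_reverse, List.head?_filter]

lemma pvOddOf (c : Int) (h : pOdd c = true) : c % 2 = 1 := by
  have := Int.emod_two_eq c
  simp [pOdd] at h
  omega
lemma pvEvenOf (c : Int) (h : pEven c = true) : c % 2 = 0 := by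
  simpa [pEven] using h
lemma pvOddNot (c : Int) (h : ¬ pOdd c = true) : c % 2 = 0 := by
  simp [pOdd] at h; omega
lemma pvEvenNot (c : Int) (h : ¬ pEven c = true) : c % 2 = 1 := by
  have := Int.emod_two_eq c
  simp [pEven] at h
  omega

-- ===== the B side: parity-class prefix sums =====

-- number of odd cards in the chosen prefix
def pvAcnt (d : List Int) (M : Nat) : Nat := ((d.take M).filter pOdd).length

-- candidate value: j odd cards plus M-j even cards, best of each class
def pvF (d : List Int) (M j : Nat) : Int :=
  (((d.filter pOdd).take j).sum) + (((d.filter pEven).take (M - j)).sum)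

-- the loop's guard, after index arithmetic
def pvFeas (d : List Int) (M j : Nat) : Bool :=
  (j % 2 == 0) && decide (j ≤ (d.filter pOdd).length) && decide (M - j ≤ (d.filter pEven).length)

-- the value B's loop computes
def pvBcore (d : List Int) (M : Nat) : Int :=
  ((((List.range (M + 1)).filter (pvFeas d M)).map (pvF d M)).max?).getD 0

lemma pvFeas_iff (d : List Int) (M j : Nat) :
    pvFeas d M j = true ↔
      (j % 2 = 0 ∧ j ≤ (d.filter pOdd).length ∧ M - j ≤ (d.filter pEven).length) := by
  simp [pvFeas, and_assoc]


-- pvPrefix builds the prefix-sum table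
lemma pvPrefix_eq (l : List Int) :
    pvPrefix l = (List.range (l.length + 1)).map (fun k => (l.take k).sum) := by
  induction l using List.reverseRecOn with
  | nil => rfl
  | append_singleton l x ih =>
    have hstep : pvPrefix (l ++ [x]) = pvPrefix l ++ [(pvPrefix l).getLastD 0 + x] := by
      unfold pvPrefix
      rw [List.foldl_append]
      rfl
    rw [hstep, ih]
    have hlast : (((List.range (l.length + 1)).map (fun k => (l.take k).sum)).getLastD 0) = l.sum := by
      rw [List.range_succ, List.map_append]
      simp
    rw [hlast]
    rw [List.length_append, List.length_singleton, List.range_succ (n := l.length + 1), List.map_append]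
    congr 1
    · apply List.map_congr_left
      intro k hk
      rw [List.mem_range] at hk
      rw [List.take_append_of_le_length (by omega)]
    · simp

-- sorting the filtered list = filtering the sorted list (both descending, same multiset)
lemma pvSortedFilter (cards : List Int) (p : Int → Bool) :
    PySem.List.sorted (cards.filter p) (fun c => c) true
      = (PySem.List.sorted cards (fun c => c) true).filter p := by
  apply PySem.List.eq_of_perm_of_pairwise_le_of_injective (fun x : Int => -x) neg_injective
  · exact (PySem.List.sorted_perm _ _ _).trans
      (((PySem.List.sorted_perm cards (fun c => c) true).filter p).symm)
  · exact (PySem.List.sorted_pairwise_rev _ _).imp (fun h => by simpa using h)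
  · exact (List.Pairwise.sublist List.filter_sublist
      (PySem.List.sorted_pairwise_rev cards (fun c => c))).imp (fun h => by simpa using h)

-- the running-max loop computes the max of the guarded candidates
lemma pvFoldMax_some (C : Nat → Prop) [DecidablePred C] (f : Nat → Int) (js : List Nat) (b : Int) :
    js.foldl (fun acc j => if C j then
        (match acc with
         | none => some (f j)
         | some bb => if f j > bb then some (f j) else some bb)
      else acc) (some b)
    = some (((js.filter (fun j => decide (C j))).map f).foldl max b) := by
  induction js generalizing b with
  | nil => rfl
  | cons j t ih =>
    by_cases h : C j
    · have hm : (if f j > b then some (f j) else some b) = some (max b (f j)) := by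
        rcases le_or_gt (f j) b with h' | h'
        · rw [if_neg (by omega), max_eq_left h']
        · rw [if_pos h', max_eq_right (by omega)]
      simp only [List.foldl_cons, if_pos h, hm, List.filter_cons, decide_eq_true h]
      rw [ih]
      rfl
    · simp only [List.foldl_cons, if_neg h, List.filter_cons]
      rw [decide_eq_false h, if_neg (by simp)]
      exact ih b

lemma pvFoldMax_none (C : Nat → Prop) [DecidablePred C] (f : Nat → Int) (js : List Nat) :
    js.foldl (fun acc j => if C j then
        (match acc with
         | none => some (f j)
         | some bb => if f j > bb then some (f j) else some bb)
      else acc) none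
    = ((js.filter (fun j => decide (C j))).map f).max? := by
  induction js with
  | nil => rfl
  | cons j t ih =>
    by_cases h : C j
    · simp only [List.foldl_cons, if_pos h, List.filter_cons, decide_eq_true h]
      rw [pvFoldMax_some]
      rfl
    · simp only [List.foldl_cons, if_neg h, List.filter_cons]
      rw [decide_eq_false h, if_neg (by simp)]
      exact ih

-- reduction of port B to pvBcore
lemma pvB_red (cards : List Int) (cnt : Int) (K : Nat)
    (hsl : PySem.List.slice cards none (some cnt) = cards.take K) :
    maxmiumScore_alt cards cnt
      = pvBcore (PySem.List.sorted cards (fun c => c) true) (min K cards.length) := by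
  have hodds : PySem.List.sorted (cards.filter (fun c => decide (PySem.Int.mod c 2 ≠ 0))) (fun c => c) true
      = (PySem.List.sorted cards (fun c => c) true).filter pOdd := by
    rw [pvPredOddB]
    exact pvSortedFilter cards pOdd
  have hevens : PySem.List.sorted (cards.filter (fun c => decide (PySem.Int.mod c 2 = 0))) (fun c => c) true
      = (PySem.List.sorted cards (fun c => c) true).filter pEven := by
    rw [pvPredEvenB]
    exact pvSortedFilter cards pEven
  simp only [maxmiumScore_alt]
  rw [hsl, hodds, hevens, List.length_take]
  set d := PySem.List.sorted cards (fun c => c) true with hd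
  set M := min K cards.length with hMdef
  set O := d.filter pOdd with hOdef
  set E := d.filter pEven with hEdef
  rw [PySem.List.pyRange_one, show (((M : Nat) : Int) + 1 - 0).toNat = M + 1 from by omega,
    List.foldl_map]
  -- the guard and the candidate, in Nat form
  have hfc : (List.range (M + 1)).filter
        (fun k : Nat => decide (PySem.Int.mod ((0:Int) + (k:Int)) 2 = 0 ∧
          ((0:Int) + (k:Int)) < ((pvPrefix O).length : Int) ∧
          ((M : Nat) : Int) - ((0:Int) + (k:Int)) < ((pvPrefix E).length : Int)))
      = (List.range (M + 1)).filter (pvFeas d M) := by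
    apply List.filter_congr
    intro k hk
    rw [List.mem_range] at hk
    apply Bool.eq_iff_iff.mpr
    rw [decide_eq_true_iff, pvFeas_iff]
    rw [pvPrefix_eq, pvPrefix_eq, List.length_map, List.length_range,
      List.length_map, List.length_range, pvModTwo]
    rw [← hOdef, ← hEdef]
    constructor
    · rintro ⟨p1, p2, p3⟩
      refine ⟨by omega, by omega, by omega⟩
    · rintro ⟨p1, p2, p3⟩
      refine ⟨by omega, by omega, by omega⟩
  have hmc : ∀ k ∈ (List.range (M + 1)).filter (pvFeas d M),
      (fun k : Nat => PySem.List.pyGetD (pvPrefix O) ((0:Int) + (k:Int)) 0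
        + PySem.List.pyGetD (pvPrefix E) (((M : Nat) : Int) - ((0:Int) + (k:Int))) 0) k
        = pvF d M k := by
    intro k hk
    rw [List.mem_filter, List.mem_range] at hk
    obtain ⟨hkr, hkf⟩ := hk
    obtain ⟨hk2, hkO, hkE⟩ := (pvFeas_iff d M k).mp hkf
    rw [← hOdef] at hkO
    rw [← hEdef] at hkE
    show PySem.List.pyGetD (pvPrefix O) ((0:Int) + (k:Int)) 0
        + PySem.List.pyGetD (pvPrefix E) (((M : Nat) : Int) - ((0:Int) + (k:Int))) 0 = pvF d M k
    rw [pvPrefix_eq, pvPrefix_eq,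
      PySem.List.pyGetD_eq_getElem _ 0 (by omega)
        (by rw [List.length_map, List.length_range]; push_cast; omega),
      PySem.List.pyGetD_eq_getElem _ 0 (by omega)
        (by rw [List.length_map, List.length_range]; push_cast; omega)]
    simp only [List.getElem_map, List.getElem_range]
    rw [show ((0:Int) + (k:Int)).toNat = k from by omega,
      show ((((M : Nat) : Int)) - ((0:Int) + (k:Int))).toNat = M - k from by omega]
    rfl
  have key : (match
      (((List.range (M + 1)).filter
        (fun k : Nat => decide (PySem.Int.mod ((0:Int) + (k:Int)) 2 = 0 ∧
          ((0:Int) + (k:Int)) < ((pvPrefix O).length : Int) ∧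
          ((M : Nat) : Int) - ((0:Int) + (k:Int)) < ((pvPrefix E).length : Int)))).map
        (fun k : Nat => PySem.List.pyGetD (pvPrefix O) ((0:Int) + (k:Int)) 0
          + PySem.List.pyGetD (pvPrefix E) (((M : Nat) : Int) - ((0:Int) + (k:Int))) 0)).max? with
      | some b => b
      | none => (0:Int)) = pvBcore d M := by
    rw [hfc, List.map_congr_left hmc]
    cases hmx : (((List.range (M + 1)).filter (pvFeas d M)).map (pvF d M)).max? with
    | none => simp [pvBcore, hmx]
    | some b => simp [pvBcore, hmx]
  rw [← pvFoldMax_none _ _ (List.range (M + 1))] at key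
  exact key

-- ===== structural facts about the parity split of the sorted list =====

lemma pvFilterLenSplit (l : List Int) :
    (l.filter pOdd).length + (l.filter pEven).length = l.length := by
  induction l with
  | nil => rfl
  | cons c t ih =>
    by_cases h : c % 2 = 0 <;> simp [List.filter_cons, pOdd, pEven, h] <;> omega

lemma pvSumSplit (l : List Int) :
    l.sum = (l.filter pOdd).sum + (l.filter pEven).sum := by
  induction l with
  | nil => rfl
  | cons c t ih =>
    by_cases h : c % 2 = 0 <;> simp [List.filter_cons, pOdd, pEven, h] <;> omega

lemma pvFilterSplit (d : List Int) (M : Nat) (p : Int → Bool) :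
    (d.take M).filter p ++ (d.drop M).filter p = d.filter p := by
  rw [← List.filter_append, List.take_append_drop]

lemma pvChFilterOdd (d : List Int) (M : Nat) :
    (d.take M).filter pOdd = (d.filter pOdd).take (pvAcnt d M) := by
  show _ = (d.filter pOdd).take (((d.take M).filter pOdd).length)
  rw [← pvFilterSplit d M pOdd]
  exact (List.take_left).symm

lemma pvRsFilterOdd (d : List Int) (M : Nat) :
    (d.drop M).filter pOdd = (d.filter pOdd).drop (pvAcnt d M) := by
  show _ = (d.filter pOdd).drop (((d.take M).filter pOdd).length)
  rw [← pvFilterSplit d M pOdd]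
  exact (List.drop_left).symm

lemma pvChFilterEven (d : List Int) (M : Nat) (hM : M ≤ d.length) :
    (d.take M).filter pEven = (d.filter pEven).take (M - pvAcnt d M) := by
  have hsplit := pvFilterLenSplit (d.take M)
  rw [List.length_take, min_eq_left hM] at hsplit
  have h : M - pvAcnt d M = ((d.take M).filter pEven).length := by unfold pvAcnt at *; omega
  rw [h, ← pvFilterSplit d M pEven]
  exact (List.take_left).symm

lemma pvRsFilterEven (d : List Int) (M : Nat) (hM : M ≤ d.length) :
    (d.drop M).filter pEven = (d.filter pEven).drop (M - pvAcnt d M) := by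
  have hsplit := pvFilterLenSplit (d.take M)
  rw [List.length_take, min_eq_left hM] at hsplit
  have h : M - pvAcnt d M = ((d.take M).filter pEven).length := by unfold pvAcnt at *; omega
  rw [h, ← pvFilterSplit d M pEven]
  exact (List.drop_left).symm

-- parity of a sum of odd / even numbers
lemma pvSumOddPar (l : List Int) (h : ∀ x ∈ l, x % 2 = 1) :
    l.sum % 2 = (l.length : Int) % 2 := by
  induction l with
  | nil => rfl
  | cons c t ih =>
    have hc := h c List.mem_cons_self
    have ht := ih (fun x hx => h x (List.mem_cons_of_mem _ hx))
    simp only [List.sum_cons, List.length_cons]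
    push_cast
    omega

lemma pvSumEvenPar (l : List Int) (h : ∀ x ∈ l, x % 2 = 0) :
    l.sum % 2 = 0 := by
  induction l with
  | nil => rfl
  | cons c t ih =>
    have hc := h c List.mem_cons_self
    have ht := ih (fun x hx => h x (List.mem_cons_of_mem _ hx))
    simp only [List.sum_cons]
    omega

-- bounds on the split
lemma pvAcnt_le (d : List Int) (M : Nat) (hM : M ≤ d.length) :
    pvAcnt d M ≤ M ∧ pvAcnt d M ≤ (d.filter pOdd).length ∧
    M - pvAcnt d M ≤ (d.filter pEven).length := by
  have h1 : ((d.take M).filter pOdd).length ≤ (d.take M).length := List.length_filter_le _ _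
  rw [List.length_take] at h1
  have h2 := congrArg List.length (pvChFilterOdd d M)
  rw [List.length_take] at h2
  have h3 := congrArg List.length (pvChFilterEven d M hM)
  rw [List.length_take] at h3
  have hsplit := pvFilterLenSplit (d.take M)
  rw [List.length_take, min_eq_left hM] at hsplit
  unfold pvAcnt at *
  omega

-- s in terms of the class prefix sums
lemma pvSumF (d : List Int) (M : Nat) (hM : M ≤ d.length) :
    (d.take M).sum = pvF d M (pvAcnt d M) := by
  rw [pvSumSplit (d.take M), pvChFilterOdd d M, pvChFilterEven d M hM]
  rfl

-- parity of s is the parity of the odd-count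
lemma pvSpar (d : List Int) (M : Nat) (hM : M ≤ d.length) :
    (d.take M).sum % 2 = ((pvAcnt d M : Int)) % 2 := by
  obtain ⟨haM, haO, haE⟩ := pvAcnt_le d M hM
  rw [pvSumF d M hM]
  unfold pvF
  have hlen : ((d.filter pOdd).take (pvAcnt d M)).length = pvAcnt d M := by
    rw [List.length_take]; omega
  have hOdd : ((d.filter pOdd).take (pvAcnt d M)).sum % 2 = ((pvAcnt d M : Int)) % 2 := by
    rw [pvSumOddPar _ (fun x hx => pvOddOf x (List.of_mem_filter (List.mem_of_mem_take hx))), hlen]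
  have hEv : ((d.filter pEven).take (M - pvAcnt d M)).sum % 2 = 0 :=
    pvSumEvenPar _ (fun x hx => pvEvenOf x (List.of_mem_filter (List.mem_of_mem_take hx)))
  omega

-- every chosen card dominates every remaining card
lemma pvCross (d : List Int) (M : Nat)
    (hp : List.Pairwise (fun a b : Int => b ≤ a) d) :
    ∀ x ∈ d.take M, ∀ y ∈ d.drop M, y ≤ x := by
  rw [← List.take_append_drop M d] at hp
  exact (List.pairwise_append.mp hp).2.2

-- an element of a list is in a long-enough prefix / late-enough suffix
lemma pvMemTake {l : List Int} {i k : Nat} (h : i < l.length) (hik : i < k) :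
    l[i]'h ∈ l.take k := by
  apply List.mem_of_getElem? (i := i)
  rw [List.getElem?_take, if_pos hik, List.getElem?_eq_getElem h]

lemma pvMemDrop {l : List Int} {i k : Nat} (h : i < l.length) (hik : k ≤ i) :
    l[i]'h ∈ l.drop k := by
  apply List.mem_of_getElem? (i := i - k)
  rw [List.getElem?_drop]
  have hki : k + (i - k) = i := by omega
  rw [hki, List.getElem?_eq_getElem h]

-- one step up below the peak
lemma pvStepUp (d : List Int) (M : Nat) (hM : M ≤ d.length)
    (hp : List.Pairwise (fun a b : Int => b ≤ a) d)
    (j : Nat) (hj : j < pvAcnt d M) (hE : M - j ≤ (d.filter pEven).length) :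
    pvF d M j ≤ pvF d M (j + 1) := by
  obtain ⟨haM, haO, haE⟩ := pvAcnt_le d M hM
  have hjO : j < (d.filter pOdd).length := by omega
  have hidxE : M - j - 1 < (d.filter pEven).length := by omega
  have hMj : M - (j + 1) = M - j - 1 := by omega
  have hsum : ((d.filter pEven).take (M - j)).sum =
      ((d.filter pEven).take (M - j - 1)).sum + (d.filter pEven)[M - j - 1]'hidxE := by
    have h := List.sum_take_succ (d.filter pEven) (M - j - 1) hidxE
    rw [show M - j - 1 + 1 = M - j from by omega] at h
    exact h
  unfold pvF
  rw [List.sum_take_succ (d.filter pOdd) j hjO, hMj, hsum]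
  have hmemx : (d.filter pOdd)[j]'hjO ∈ d.take M := by
    have hmem : (d.filter pOdd)[j]'hjO ∈ (d.filter pOdd).take (pvAcnt d M) :=
      pvMemTake hjO (by omega)
    rw [← pvChFilterOdd] at hmem
    exact List.mem_of_mem_filter hmem
  have hmemy : (d.filter pEven)[M - j - 1]'hidxE ∈ d.drop M := by
    have hmem : (d.filter pEven)[M - j - 1]'hidxE ∈ (d.filter pEven).drop (M - pvAcnt d M) :=
      pvMemDrop hidxE (by omega)
    rw [← pvRsFilterEven d M hM] at hmem
    exact List.mem_of_mem_filter hmem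
  have hcross := pvCross d M hp _ hmemx _ hmemy
  omega

-- one step down above the peak
lemma pvStepDown (d : List Int) (M : Nat) (hM : M ≤ d.length)
    (hp : List.Pairwise (fun a b : Int => b ≤ a) d)
    (t : Nat) (ht : pvAcnt d M ≤ t) (htM : t + 1 ≤ M) (htO : t + 1 ≤ (d.filter pOdd).length) :
    pvF d M (t + 1) ≤ pvF d M t := by
  obtain ⟨haM, haO, haE⟩ := pvAcnt_le d M hM
  have htO' : t < (d.filter pOdd).length := by omega
  have hidxE : M - t - 1 < (d.filter pEven).length := by omega
  have hMt : M - (t + 1) = M - t - 1 := by omega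
  have hsum : ((d.filter pEven).take (M - t)).sum =
      ((d.filter pEven).take (M - t - 1)).sum + (d.filter pEven)[M - t - 1]'hidxE := by
    have h := List.sum_take_succ (d.filter pEven) (M - t - 1) hidxE
    rw [show M - t - 1 + 1 = M - t from by omega] at h
    exact h
  unfold pvF
  rw [List.sum_take_succ (d.filter pOdd) t htO', hMt, hsum]
  have hmemy : (d.filter pOdd)[t]'htO' ∈ d.drop M := by
    have hmem : (d.filter pOdd)[t]'htO' ∈ (d.filter pOdd).drop (pvAcnt d M) :=
      pvMemDrop htO' (by omega)
    rw [← pvRsFilterOdd d M] at hmem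
    exact List.mem_of_mem_filter hmem
  have hmemx : (d.filter pEven)[M - t - 1]'hidxE ∈ d.take M := by
    have hmem : (d.filter pEven)[M - t - 1]'hidxE ∈ (d.filter pEven).take (M - pvAcnt d M) :=
      pvMemTake hidxE (by omega)
    rw [← pvChFilterEven d M hM] at hmem
    exact List.mem_of_mem_filter hmem
  have hcross := pvCross d M hp _ hmemx _ hmemy
  omega

-- climbing towards the peak from the left
lemma pvClimb (d : List Int) (M : Nat) (hM : M ≤ d.length)
    (hp : List.Pairwise (fun a b : Int => b ≤ a) d)
    (j t : Nat) (hjt : j ≤ t) (hta : t ≤ pvAcnt d M) (hE : M - j ≤ (d.filter pEven).length) :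
    pvF d M j ≤ pvF d M t := by
  induction t with
  | zero => have : j = 0 := by omega
            rw [this]
  | succ t ih =>
    rcases Nat.lt_or_ge t j with h | h
    · have : j = t + 1 := by omega
      rw [this]
    · exact le_trans (ih h (by omega)) (pvStepUp d M hM hp t (by omega) (by omega))

-- descending towards the peak from the right
lemma pvDescend (d : List Int) (M : Nat) (hM : M ≤ d.length)
    (hp : List.Pairwise (fun a b : Int => b ≤ a) d)
    (t j : Nat) (hat : pvAcnt d M ≤ t) (htj : t ≤ j) (hjM : j ≤ M)
    (hjO : j ≤ (d.filter pOdd).length) :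
    pvF d M j ≤ pvF d M t := by
  induction j with
  | zero => have : t = 0 := by omega
            rw [this]
  | succ j ih =>
    rcases Nat.lt_or_ge j t with h | h
    · have : t = j + 1 := by omega
      rw [this]
    · exact le_trans (pvStepDown d M hM hp j (by omega) (by omega) (by omega))
        (ih h (by omega) (by omega))

-- the even case: the loop's max is the plain top-M sum
lemma pvBcore_even (d : List Int) (M : Nat) (hM : M ≤ d.length)
    (hp : List.Pairwise (fun a b : Int => b ≤ a) d)
    (ha : pvAcnt d M % 2 = 0) :
    pvBcore d M = (d.take M).sum := by
  obtain ⟨haM, haO, haE⟩ := pvAcnt_le d M hM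
  have hmem : pvF d M (pvAcnt d M) ∈
      ((List.range (M + 1)).filter (pvFeas d M)).map (pvF d M) := by
    apply List.mem_map_of_mem
    rw [List.mem_filter]
    exact ⟨List.mem_range.mpr (by omega), (pvFeas_iff d M _).mpr ⟨ha, haO, haE⟩⟩
  have hub : ∀ v ∈ ((List.range (M + 1)).filter (pvFeas d M)).map (pvF d M),
      v ≤ pvF d M (pvAcnt d M) := by
    intro v hv
    obtain ⟨j, hj, rfl⟩ := List.mem_map.mp hv
    rw [List.mem_filter, List.mem_range] at hj
    obtain ⟨hjr, hjf⟩ := hj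
    obtain ⟨hj2, hjO, hjE⟩ := (pvFeas_iff d M j).mp hjf
    rcases Nat.le_total j (pvAcnt d M) with hle | hge
    · exact pvClimb d M hM hp j (pvAcnt d M) hle (le_refl _) hjE
    · exact pvDescend d M hM hp (pvAcnt d M) j (le_refl _) hge (by omega) hjO
  unfold pvBcore
  rw [List.max?_eq_some_iff.mpr ⟨hmem, hub⟩, Option.getD_some, pvSumF d M hM]

-- the odd case: the loop's max is the two-endpoint-swap value
lemma pvBcore_odd (d : List Int) (M : Nat) (hM : M ≤ d.length)
    (hp : List.Pairwise (fun a b : Int => b ≤ a) d)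
    (ha : pvAcnt d M % 2 = 1) :
    pvBcore d M = pvB2 (d.take M) (d.drop M) (d.take M).sum := by
  obtain ⟨haM, haO, haE⟩ := pvAcnt_le d M hM
  have ha1 : 1 ≤ pvAcnt d M := by omega
  have hidx1 : pvAcnt d M - 1 < (d.filter pOdd).length := by omega
  -- the four class endpoints
  have hlastO : ((d.filter pOdd).take (pvAcnt d M)).getLast? =
      some ((d.filter pOdd)[pvAcnt d M - 1]'hidx1) := by
    rw [List.getLast?_eq_getElem?, List.length_take, min_eq_left haO,
      List.getElem?_take, if_pos (by omega), List.getElem?_eq_getElem hidx1]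
  have hheadE : ((d.filter pEven).drop (M - pvAcnt d M)).head? =
      (d.filter pEven)[M - pvAcnt d M]? := by
    rw [List.head?_eq_getElem?, List.getElem?_drop, Nat.add_zero]
  have hlastE : ((d.filter pEven).take (M - pvAcnt d M)).getLast? =
      if h : 1 ≤ M - pvAcnt d M then
        some ((d.filter pEven)[M - pvAcnt d M - 1]'(by omega))
      else none := by
    split_ifs with h
    · rw [List.getLast?_eq_getElem?, List.length_take, min_eq_left haE,
        List.getElem?_take, if_pos (by omega), List.getElem?_eq_getElem (by omega)]
    · rw [show M - pvAcnt d M = 0 from by omega, List.take_zero]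
      rfl
  have hheadO : ((d.filter pOdd).drop (pvAcnt d M)).head? =
      (d.filter pOdd)[pvAcnt d M]? := by
    rw [List.head?_eq_getElem?, List.getElem?_drop, Nat.add_zero]
  -- upper bound over the loop's candidates
  have hub : ∀ v ∈ ((List.range (M + 1)).filter (pvFeas d M)).map (pvF d M),
      ((M - pvAcnt d M < (d.filter pEven).length) ∧ v ≤ pvF d M (pvAcnt d M - 1)) ∨
      ((pvAcnt d M + 1 ≤ M ∧ pvAcnt d M + 1 ≤ (d.filter pOdd).length) ∧
        v ≤ pvF d M (pvAcnt d M + 1)) := by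
    intro v hv
    obtain ⟨j, hj, rfl⟩ := List.mem_map.mp hv
    rw [List.mem_filter, List.mem_range] at hj
    obtain ⟨hjr, hjf⟩ := hj
    obtain ⟨hj2, hjO, hjE⟩ := (pvFeas_iff d M j).mp hjf
    rcases Nat.lt_or_ge j (pvAcnt d M) with hlt | hge
    · left
      refine ⟨by omega, ?_⟩
      exact pvClimb d M hM hp j (pvAcnt d M - 1) (by omega) (by omega) hjE
    · right
      refine ⟨⟨by omega, by omega⟩, ?_⟩
      exact pvDescend d M hM hp (pvAcnt d M + 1) j (by omega) (by omega) (by omega) hjO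
  -- memberships
  have hmem1 : M - pvAcnt d M < (d.filter pEven).length →
      pvF d M (pvAcnt d M - 1) ∈
        ((List.range (M + 1)).filter (pvFeas d M)).map (pvF d M) := by
    intro h1
    apply List.mem_map_of_mem
    rw [List.mem_filter]
    exact ⟨List.mem_range.mpr (by omega), (pvFeas_iff d M _).mpr ⟨by omega, by omega, by omega⟩⟩
  have hmem2 : pvAcnt d M + 1 ≤ M → pvAcnt d M + 1 ≤ (d.filter pOdd).length →
      pvF d M (pvAcnt d M + 1) ∈
        ((List.range (M + 1)).filter (pvFeas d M)).map (pvF d M) := by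
    intro h2M h2O
    apply List.mem_map_of_mem
    rw [List.mem_filter]
    exact ⟨List.mem_range.mpr (by omega), (pvFeas_iff d M _).mpr ⟨by omega, by omega, by omega⟩⟩
  -- candidate values
  have hsF := pvSumF d M hM
  have hc1 : ∀ h1 : M - pvAcnt d M < (d.filter pEven).length,
      (d.take M).sum - (d.filter pOdd)[pvAcnt d M - 1]'hidx1
        + (d.filter pEven)[M - pvAcnt d M]'h1 = pvF d M (pvAcnt d M - 1) := by
    intro h1
    have hOs : ((d.filter pOdd).take (pvAcnt d M)).sum =
        ((d.filter pOdd).take (pvAcnt d M - 1)).sum + (d.filter pOdd)[pvAcnt d M - 1]'hidx1 := by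
      have h := List.sum_take_succ (d.filter pOdd) (pvAcnt d M - 1) hidx1
      rw [show pvAcnt d M - 1 + 1 = pvAcnt d M from by omega] at h
      exact h
    have hEs : ((d.filter pEven).take (M - (pvAcnt d M - 1))).sum =
        ((d.filter pEven).take (M - pvAcnt d M)).sum + (d.filter pEven)[M - pvAcnt d M]'h1 := by
      have h := List.sum_take_succ (d.filter pEven) (M - pvAcnt d M) h1
      rw [show M - pvAcnt d M + 1 = M - (pvAcnt d M - 1) from by omega] at h
      exact h
    unfold pvF at hsF ⊢
    omega
  have hc2 : ∀ (h2O : pvAcnt d M < (d.filter pOdd).length) (_h2M : pvAcnt d M + 1 ≤ M),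
      (d.take M).sum - (d.filter pEven)[M - pvAcnt d M - 1]'(by omega)
        + (d.filter pOdd)[pvAcnt d M]'h2O = pvF d M (pvAcnt d M + 1) := by
    intro h2O h2M
    have hOs : ((d.filter pOdd).take (pvAcnt d M + 1)).sum =
        ((d.filter pOdd).take (pvAcnt d M)).sum + (d.filter pOdd)[pvAcnt d M]'h2O :=
      List.sum_take_succ _ _ h2O
    have hEidx : M - pvAcnt d M - 1 < (d.filter pEven).length := by omega
    have hEs : ((d.filter pEven).take (M - pvAcnt d M)).sum =
        ((d.filter pEven).take (M - pvAcnt d M - 1)).sum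
          + (d.filter pEven)[M - pvAcnt d M - 1]'hEidx := by
      have h := List.sum_take_succ (d.filter pEven) (M - pvAcnt d M - 1) hEidx
      rw [show M - pvAcnt d M - 1 + 1 = M - pvAcnt d M from by omega] at h
      exact h
    unfold pvF at hsF ⊢
    rw [show M - (pvAcnt d M + 1) = M - pvAcnt d M - 1 from by omega]
    omega
  by_cases h1 : M - pvAcnt d M < (d.filter pEven).length
  · by_cases h2 : pvAcnt d M + 1 ≤ M ∧ pvAcnt d M + 1 ≤ (d.filter pOdd).length
    · -- both endpoint swaps available
      obtain ⟨h2M, h2O⟩ := h2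
      have hmax : ((((List.range (M + 1)).filter (pvFeas d M)).map (pvF d M)).max?)
          = some (max (pvF d M (pvAcnt d M - 1)) (pvF d M (pvAcnt d M + 1))) := by
        apply List.max?_eq_some_iff.mpr
        constructor
        · rcases max_choice (pvF d M (pvAcnt d M - 1)) (pvF d M (pvAcnt d M + 1)) with h | h <;> rw [h]
          · exact hmem1 h1
          · exact hmem2 h2M h2O
        · intro v hv
          rcases hub v hv with ⟨-, hle⟩ | ⟨-, hle⟩
          · exact le_trans hle (le_max_left _ _)
          · exact le_trans hle (le_max_right _ _)
      unfold pvBcore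
      rw [hmax, Option.getD_some]
      unfold pvB2
      rw [pvPredOddB, pvPredEvenB, pvChFilterOdd, pvChFilterEven d M hM,
        pvRsFilterOdd, pvRsFilterEven d M hM, hlastO, hheadE, hlastE, hheadO,
        dif_pos (show 1 ≤ M - pvAcnt d M from by omega),
        List.getElem?_eq_getElem h1, List.getElem?_eq_getElem (show pvAcnt d M < (d.filter pOdd).length from by omega)]
      rw [← hc1 h1, ← hc2 (by omega) h2M]
      simp only [List.cons_append, List.nil_append, PySem.List.max?_id_cons,
        List.foldl_cons, List.foldl_nil]
    · -- only the (a-1) swap available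
      have hmax : ((((List.range (M + 1)).filter (pvFeas d M)).map (pvF d M)).max?)
          = some (pvF d M (pvAcnt d M - 1)) := by
        apply List.max?_eq_some_iff.mpr
        refine ⟨hmem1 h1, fun v hv => ?_⟩
        rcases hub v hv with ⟨-, hle⟩ | ⟨hav2, -⟩
        · exact hle
        · exact absurd hav2 h2
      unfold pvBcore
      rw [hmax, Option.getD_some]
      unfold pvB2
      rw [pvPredOddB, pvPredEvenB, pvChFilterOdd, pvChFilterEven d M hM,
        pvRsFilterOdd, pvRsFilterEven d M hM, hlastO, hheadE, hlastE, hheadO,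
        List.getElem?_eq_getElem h1]
      rw [← hc1 h1]
      rcases Nat.lt_or_ge M (pvAcnt d M + 1) with hM2 | hM2
      · rw [dif_neg (by omega)]
        simp only [List.append_nil, PySem.List.max?_id_cons, List.foldl_nil]
      · have hO2 : (d.filter pOdd).length ≤ pvAcnt d M := by
          rcases Nat.lt_or_ge (pvAcnt d M) (d.filter pOdd).length with h | h
          · exact absurd ⟨by omega, by omega⟩ h2
          · exact h
        rw [List.getElem?_eq_none (by omega), dif_pos (by omega)]
        simp only [List.append_nil, PySem.List.max?_id_cons, List.foldl_nil]
  · have hE2 : (d.filter pEven).length ≤ M - pvAcnt d M := by omega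
    by_cases h2 : pvAcnt d M + 1 ≤ M ∧ pvAcnt d M + 1 ≤ (d.filter pOdd).length
    · -- only the (a+1) swap available
      obtain ⟨h2M, h2O⟩ := h2
      have hmax : ((((List.range (M + 1)).filter (pvFeas d M)).map (pvF d M)).max?)
          = some (pvF d M (pvAcnt d M + 1)) := by
        apply List.max?_eq_some_iff.mpr
        refine ⟨hmem2 h2M h2O, fun v hv => ?_⟩
        rcases hub v hv with ⟨hav1, -⟩ | ⟨-, hle⟩
        · exact absurd hav1 h1
        · exact hle
      unfold pvBcore
      rw [hmax, Option.getD_some]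
      unfold pvB2
      rw [pvPredOddB, pvPredEvenB, pvChFilterOdd, pvChFilterEven d M hM,
        pvRsFilterOdd, pvRsFilterEven d M hM, hlastO, hheadE, hlastE, hheadO,
        dif_pos (show 1 ≤ M - pvAcnt d M from by omega),
        List.getElem?_eq_none (show (d.filter pEven).length ≤ M - pvAcnt d M from hE2),
        List.getElem?_eq_getElem (show pvAcnt d M < (d.filter pOdd).length from by omega)]
      rw [← hc2 (by omega) h2M]
      simp only [List.nil_append, PySem.List.max?_id_cons, List.foldl_nil]
    · -- no swap available: both sides 0
      have hLnil : ((List.range (M + 1)).filter (pvFeas d M)).map (pvF d M) = [] := by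
        apply List.eq_nil_iff_forall_not_mem.mpr
        intro v hv
        rcases hub v hv with ⟨hav1, -⟩ | ⟨hav2, -⟩
        · exact absurd hav1 h1
        · exact absurd hav2 h2
      unfold pvBcore
      rw [hLnil]
      unfold pvB2
      rw [pvPredOddB, pvPredEvenB, pvChFilterOdd, pvChFilterEven d M hM,
        pvRsFilterOdd, pvRsFilterEven d M hM, hlastO, hheadE, hlastE, hheadO,
        List.getElem?_eq_none (show (d.filter pEven).length ≤ M - pvAcnt d M from hE2)]
      rcases Nat.lt_or_ge M (pvAcnt d M + 1) with hM2 | hM2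
      · rw [dif_neg (by omega)]
        simp [PySem.List.max?]
      · have hO2 : (d.filter pOdd).length ≤ pvAcnt d M := by
          rcases Nat.lt_or_ge (pvAcnt d M) (d.filter pOdd).length with h | h
          · exact absurd ⟨by omega, by omega⟩ h2
          · exact h
        rw [dif_pos (by omega), List.getElem?_eq_none (by omega)]
        simp [PySem.List.max?]

-- ===== the heart (A side): A's swap search and the two-candidate form agree (outside the 0-fallback corner) =====
lemma pvCore (ch rest : List Int) (hodd : ch.sum % 2 = 1) :
    (pvDcore ch rest →
      pvA2 ch rest (ch.getLastD 0) ch.sum = 0 ∧ pvB2 ch rest ch.sum < 0) ∧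
    (¬ pvDcore ch rest →
      pvA2 ch rest (ch.getLastD 0) ch.sum = pvB2 ch rest ch.sum) := by
  have hchne := pvChosen_ne_nil hodd
  set s := ch.sum with hs
  set x := ch.getLastD 0 with hxdef
  have hx : ch.getLast? = some x := by
    rw [hxdef, List.getLastD_eq_getLast?]
    cases hc : ch.getLast? with
    | none => exact absurd (List.getLast?_eq_none_iff.mp hc) hchne
    | some v => rfl
  have hrevhead : ch.reverse.head? = some x := by rw [List.head?_reverse]; exact hx
  obtain ⟨rt, hrt⟩ := List.head?_eq_some_iff.mp hrevhead
  -- B in find? form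
  have hB : pvB2 ch rest s =
      match PySem.List.max?
        ((match ch.reverse.find? pOdd, rest.find? pEven with
          | some a, some b => [s - a + b]
          | _, _ => ([] : List Int)) ++
         (match ch.reverse.find? pEven, rest.find? pOdd with
          | some a, some b => [s - a + b]
          | _, _ => ([] : List Int))) (fun c => c) with
      | some m => m
      | none => 0 := by
    unfold pvB2
    rw [pvFilterLast, pvFilterLast, List.head?_filter, List.head?_filter,
      pvPredOddB, pvPredEvenB]
  have hDcore : pvDcore ch rest ↔
      (s % 2 = 1 ∧ rest ≠ [] ∧ (∀ r ∈ rest, r % 2 = x % 2) ∧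
        ch.filter (fun c => c % 2 != x % 2) ≠ [] ∧
        s - (ch.filter (fun c => c % 2 != x % 2)).getLastD 0 + rest.headD 0 < 0) := Iff.rfl
  rcases Int.emod_two_eq x with hx2 | hx2
  · -- x even: A's searches are for odd cards
    have hE : ch.reverse.find? pEven = some x := by
      rw [hrt]
      exact List.find?_cons_of_pos (p := pEven) (h := by simp [pEven, hx2])
    have hpred : (fun n : Int => n % 2 != x % 2) = pOdd := pvPredX0 x hx2
    cases hoR : rest.find? pOdd with
    | some n1 =>
      -- first swap exists; D cannot hold
      have hn1odd : n1 % 2 = 1 := pvOddOf n1 (List.find?_some hoR)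
      have hnD : ¬ pvDcore ch rest := by
        rw [hDcore]
        rintro ⟨-, -, hall, -, -⟩
        have := hall n1 (List.mem_of_find?_eq_some hoR)
        omega
      refine ⟨fun hD => absurd hD hnD, fun _ => ?_⟩
      cases hO : ch.reverse.find? pOdd with
      | some n2 =>
        have hn2odd : n2 % 2 = 1 := pvOddOf n2 (List.find?_some hO)
        have hinner : (fun nn : Int => nn % 2 != n2 % 2) = pEven := pvPredX n2 hn2odd
        cases heR : rest.find? pEven with
        | some nn =>
          simp only [pvA2, hB, hpred, hinner, hoR, hO, hE, heR,
            PySem.List.max?_id_cons, List.cons_append, List.nil_append,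
            List.foldl_cons, List.foldl_nil]
          rw [max_comm]
          congr 1; ring
        | none =>
          simp only [pvA2, hB, hpred, hinner, hoR, hO, hE, heR,
            PySem.List.max?_id_cons, List.nil_append, List.foldl_nil]
          ring
      | none =>
        simp only [pvA2, hB, hpred, hoR, hO, hE,
          PySem.List.max?_id_cons, List.nil_append, List.foldl_nil]
        ring
    | none =>
      -- no odd card remains: A's ret stays 0
      have hallE : ∀ r ∈ rest, r % 2 = 0 := fun r hr =>
        pvOddNot r (List.find?_eq_none.mp hoR r hr)
      cases hO : ch.reverse.find? pOdd with
      | none =>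
        -- no odd chosen either: both 0, D impossible (opp empty)
        have hopp : ch.filter (fun c => c % 2 != x % 2) = [] := by
          rw [hpred]
          exact List.filter_eq_nil_iff.mpr
            (fun a ha => List.find?_eq_none.mp hO a (List.mem_reverse.mpr ha))
        refine ⟨fun hD => ?_, fun _ => ?_⟩
        · rw [hDcore] at hD
          exact absurd hopp hD.2.2.2.1
        · simp [pvA2, hB, hpred, hoR, hO, hE, PySem.List.max?]
      | some n2 =>
        have hn2odd : n2 % 2 = 1 := pvOddOf n2 (List.find?_some hO)
        have hinner : (fun nn : Int => nn % 2 != n2 % 2) = pEven := pvPredX n2 hn2odd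
        -- opp's last is n2
        have hoppl : (ch.filter (fun c => c % 2 != x % 2)).getLast? = some n2 := by
          rw [hpred, pvFilterLast]; exact hO
        have hoppne : ch.filter (fun c => c % 2 != x % 2) ≠ [] := by
          intro h
          rw [h] at hoppl
          simp at hoppl
        have hopplD : (ch.filter (fun c => c % 2 != x % 2)).getLastD 0 = n2 := by
          rw [List.getLastD_eq_getLast?, hoppl]; rfl
        cases heR : rest.find? pEven with
        | none =>
          -- rest has neither parity: rest = []
          have hrestnil : rest = [] := by
            cases hrest' : rest with
            | nil => rfl
            | cons r t =>
              have h1 := hallE r (by rw [hrest']; exact List.mem_cons_self)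
              have h2 := pvEvenNot r (List.find?_eq_none.mp heR r (by rw [hrest']; exact List.mem_cons_self))
              omega
          refine ⟨fun hD => ?_, fun _ => ?_⟩
          · rw [hDcore] at hD
            exact absurd hrestnil hD.2.1
          · simp [pvA2, hB, hpred, hinner, hoR, hO, hE, heR, PySem.List.max?]
        | some nn =>
          -- the asymmetric corner: A = max 0 v, B = v
          obtain ⟨r, t, hrest'⟩ : ∃ r t, rest = r :: t := by
            cases hrest' : rest with
            | nil =>
              rw [hrest'] at heR
              simp at heR
            | cons r t => exact ⟨r, t, rfl⟩
          have hrE : pEven r = true := by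
            have := hallE r (by rw [hrest']; exact List.mem_cons_self)
            simp [pEven, this]
          have hnn : nn = r := by
            rw [hrest'] at heR
            rw [List.find?_cons_of_pos (p := pEven) (h := hrE)] at heR
            exact ((Option.some.injEq _ _).mp heR).symm
          have hheadD : rest.headD 0 = nn := by rw [hrest', hnn]; rfl
          have hAv : pvA2 ch rest x s = max 0 (s - n2 + nn) := by
            simp [pvA2, hpred, hinner, hoR, hO, heR]
          have hBv : pvB2 ch rest s = s - n2 + nn := by
            simp [hB, hoR, hO, hE, heR, PySem.List.max?_id_cons]
          constructor
          · intro hD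
            rw [hDcore] at hD
            have hlt : s - n2 + nn < 0 := by
              have := hD.2.2.2.2
              rwa [hopplD, hheadD] at this
            rw [hAv, hBv]
            exact ⟨max_eq_left (by omega), by omega⟩
          · intro hnd
            have hge : ¬ (s - n2 + nn < 0) := by
              intro hlt
              apply hnd
              rw [hDcore]
              refine ⟨hodd, by rw [hrest']; simp, ?_, hoppne, ?_⟩
              · intro rr hrr
                rw [hx2]
                exact hallE rr hrr
              · rwa [hopplD, hheadD]
            rw [hAv, hBv, max_eq_right (by omega)]
  · -- x odd: A's searches are for even cards
    have hO : ch.reverse.find? pOdd = some x := by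
      rw [hrt]
      exact List.find?_cons_of_pos (p := pOdd) (h := by simp [pOdd, hx2])
    have hpred : (fun n : Int => n % 2 != x % 2) = pEven := pvPredX x hx2
    cases heR : rest.find? pEven with
    | some n1 =>
      have hn1even : n1 % 2 = 0 := pvEvenOf n1 (List.find?_some heR)
      have hnD : ¬ pvDcore ch rest := by
        rw [hDcore]
        rintro ⟨-, -, hall, -, -⟩
        have := hall n1 (List.mem_of_find?_eq_some heR)
        omega
      refine ⟨fun hD => absurd hD hnD, fun _ => ?_⟩
      cases hE : ch.reverse.find? pEven with
      | some n2 =>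
        have hn2even : n2 % 2 = 0 := pvEvenOf n2 (List.find?_some hE)
        have hinner : (fun nn : Int => nn % 2 != n2 % 2) = pOdd := pvPredX0 n2 hn2even
        cases hoR : rest.find? pOdd with
        | some nn =>
          simp only [pvA2, hB, hpred, hinner, hoR, hO, hE, heR,
            PySem.List.max?_id_cons, List.cons_append, List.nil_append,
            List.foldl_cons, List.foldl_nil]
          congr 1; ring
        | none =>
          simp only [pvA2, hB, hpred, hinner, hoR, hO, hE, heR,
            PySem.List.max?_id_cons, List.append_nil, List.foldl_nil]
          ring
      | none =>
        simp only [pvA2, hB, hpred, heR, hO, hE,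
          PySem.List.max?_id_cons, List.append_nil, List.foldl_nil]
        ring
    | none =>
      have hallO : ∀ r ∈ rest, r % 2 = 1 := fun r hr =>
        pvEvenNot r (List.find?_eq_none.mp heR r hr)
      cases hE : ch.reverse.find? pEven with
      | none =>
        have hopp : ch.filter (fun c => c % 2 != x % 2) = [] := by
          rw [hpred]
          exact List.filter_eq_nil_iff.mpr
            (fun a ha => List.find?_eq_none.mp hE a (List.mem_reverse.mpr ha))
        refine ⟨fun hD => ?_, fun _ => ?_⟩
        · rw [hDcore] at hD
          exact absurd hopp hD.2.2.2.1
        · simp [pvA2, hB, hpred, heR, hE, hO, PySem.List.max?]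
      | some n2 =>
        have hn2even : n2 % 2 = 0 := pvEvenOf n2 (List.find?_some hE)
        have hinner : (fun nn : Int => nn % 2 != n2 % 2) = pOdd := pvPredX0 n2 hn2even
        have hoppl : (ch.filter (fun c => c % 2 != x % 2)).getLast? = some n2 := by
          rw [hpred, pvFilterLast]; exact hE
        have hoppne : ch.filter (fun c => c % 2 != x % 2) ≠ [] := by
          intro h
          rw [h] at hoppl
          simp at hoppl
        have hopplD : (ch.filter (fun c => c % 2 != x % 2)).getLastD 0 = n2 := by
          rw [List.getLastD_eq_getLast?, hoppl]; rfl
        cases hoR : rest.find? pOdd with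
        | none =>
          have hrestnil : rest = [] := by
            cases hrest' : rest with
            | nil => rfl
            | cons r t =>
              have h1 := hallO r (by rw [hrest']; exact List.mem_cons_self)
              have h2 := pvOddNot r (List.find?_eq_none.mp hoR r (by rw [hrest']; exact List.mem_cons_self))
              omega
          refine ⟨fun hD => ?_, fun _ => ?_⟩
          · rw [hDcore] at hD
            exact absurd hrestnil hD.2.1
          · simp [pvA2, hB, hpred, hinner, heR, hE, hO, hoR, PySem.List.max?]
        | some nn =>
          obtain ⟨r, t, hrest'⟩ : ∃ r t, rest = r :: t := by
            cases hrest' : rest with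
            | nil =>
              rw [hrest'] at hoR
              simp at hoR
            | cons r t => exact ⟨r, t, rfl⟩
          have hrO : pOdd r = true := by
            have := hallO r (by rw [hrest']; exact List.mem_cons_self)
            simp [pOdd, this]
          have hnn : nn = r := by
            rw [hrest'] at hoR
            rw [List.find?_cons_of_pos (p := pOdd) (h := hrO)] at hoR
            exact ((Option.some.injEq _ _).mp hoR).symm
          have hheadD : rest.headD 0 = nn := by rw [hrest', hnn]; rfl
          have hAv : pvA2 ch rest x s = max 0 (s - n2 + nn) := by
            simp [pvA2, hpred, hinner, heR, hE, hoR]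
          have hBv : pvB2 ch rest s = s - n2 + nn := by
            simp [hB, heR, hE, hO, hoR, PySem.List.max?_id_cons]
          constructor
          · intro hD
            rw [hDcore] at hD
            have hlt : s - n2 + nn < 0 := by
              have := hD.2.2.2.2
              rwa [hopplD, hheadD] at this
            rw [hAv, hBv]
            exact ⟨max_eq_left (by omega), by omega⟩
          · intro hnd
            have hge : ¬ (s - n2 + nn < 0) := by
              intro hlt
              apply hnd
              rw [hDcore]
              refine ⟨hodd, by rw [hrest']; simp, ?_, hoppne, ?_⟩
              · intro rr hrr
                rw [hx2]
                exact hallO rr hrr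
              · rwa [hopplD, hheadD]
            rw [hAv, hBv, max_eq_right (by omega)]

lemma pvDecideNe (q : Int) :
    (fun c : Int => decide (c % 2 ≠ q)) = (fun c : Int => c % 2 != q) := by
  funext c; by_cases h : c % 2 = q <;> simp [h]

-- D_ in % form, for any prefix length M realising the Python slices
lemma pvD_iffM (cards : List Int) (cnt : Int) (M : Nat)
    (hm : (if cnt < 0 then cnt + cards.length else cnt).toNat = M) :
    D_maxmiumScore cards cnt ↔
      pvDcore ((PySem.List.sorted cards (fun c => c) true).take M)
        ((PySem.List.sorted cards (fun c => c) true).drop M) := by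
  unfold D_maxmiumScore pvDcore
  simp only [hm, pvDecideNe]

-- in the even branch A returns the plain top-cnt sum
lemma pvA_even (cards : List Int) (cnt : Int)
    (hev : (PySem.List.slice (PySem.List.sorted cards (fun c => c) true) none (some cnt)).sum % 2 = 0) :
    maxmiumScore cards cnt
      = (PySem.List.slice (PySem.List.sorted cards (fun c => c) true) none (some cnt)).sum := by
  simp only [maxmiumScore]
  rw [if_pos (by rw [pvBandOne]; omega)]

-- the B port evaluated via pvBcore_even / pvBcore_odd, for both slice regimes
lemma pvB_evalK (cards : List Int) (cnt : Int) (K : Nat)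
    (hsl : PySem.List.slice cards none (some cnt) = cards.take K) :
    maxmiumScore_alt cards cnt =
      (if ((PySem.List.sorted cards (fun c => c) true).take (min K cards.length)).sum % 2 = 0
       then ((PySem.List.sorted cards (fun c => c) true).take (min K cards.length)).sum
       else pvB2 ((PySem.List.sorted cards (fun c => c) true).take (min K cards.length))
         ((PySem.List.sorted cards (fun c => c) true).drop (min K cards.length))
         ((PySem.List.sorted cards (fun c => c) true).take (min K cards.length)).sum) := by
  set d := PySem.List.sorted cards (fun c => c) true with hd
  have hlen : d.length = cards.length := PySem.List.length_sorted cards (fun c => c) true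
  have hM : min K cards.length ≤ d.length := by omega
  have hp : List.Pairwise (fun a b : Int => b ≤ a) d :=
    PySem.List.sorted_pairwise_rev cards (fun c => c)
  rw [pvB_red cards cnt K hsl, ← hd]
  have hpar := pvSpar d (min K cards.length) hM
  split_ifs with h
  · exact pvBcore_even d (min K cards.length) hM hp (by omega)
  · have : (d.take (min K cards.length)).sum % 2 = 1 := by
      rcases Int.emod_two_eq (d.take (min K cards.length)).sum with h' | h'
      · exact absurd h' h
      · exact h'
    exact pvBcore_odd d (min K cards.length) hM hp (by omega)

-- ===== VERDICT (by name: the statement is the Claim_ definition above) =====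
theorem maxmiumScore_spec : Claim_unchanged_maxmiumScore := by
  intro cards cnt hdom hpre hnd
  show maxmiumScore cards cnt = maxmiumScore_alt cards cnt
  have hlen : (PySem.List.sorted cards (fun c => c) true).length = cards.length :=
    PySem.List.length_sorted cards (fun c => c) true
  rcases lt_or_ge cnt 0 with hneg | h0
  · have hslc := pvSliceToNeg cards cnt hneg
    have hsld : PySem.List.slice (PySem.List.sorted cards (fun c => c) true) none (some cnt)
        = (PySem.List.sorted cards (fun c => c) true).take (cnt + cards.length).toNat := by
      rw [pvSliceToNeg _ cnt hneg, hlen]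
    have hKle : (cnt + cards.length).toNat ≤ cards.length := by omega
    have hmin : min (cnt + cards.length).toNat cards.length = (cnt + cards.length).toNat :=
      min_eq_left hKle
    have hB := pvB_evalK cards cnt (cnt + cards.length).toNat hslc
    rw [hmin] at hB
    rcases Int.emod_two_eq
        ((PySem.List.sorted cards (fun c => c) true).take (cnt + cards.length).toNat).sum
      with hev | hod
    · have hev' : (PySem.List.slice (PySem.List.sorted cards (fun c => c) true) none
          (some cnt)).sum % 2 = 0 := by rw [hsld]; exact hev
      rw [pvA_even cards cnt hev', hsld, hB, if_pos hev]
    · rw [hB, if_neg (by omega), pvA_evalNeg cards cnt hneg hod]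
      exact (pvCore _ _ hod).2
        (fun hc => hnd ((pvD_iffM cards cnt _ (by rw [if_pos hneg])).mpr hc))
  · have hslc := PySem.List.slice_to cards h0
    have hsld : PySem.List.slice (PySem.List.sorted cards (fun c => c) true) none (some cnt)
        = (PySem.List.sorted cards (fun c => c) true).take cnt.toNat :=
      PySem.List.slice_to _ h0
    have hB := pvB_evalK cards cnt cnt.toNat hslc
    rcases Int.emod_two_eq
        ((PySem.List.sorted cards (fun c => c) true).take (min cnt.toNat cards.length)).sum
      with hev | hod
    · have htake : (PySem.List.sorted cards (fun c => c) true).take cnt.toNat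
          = (PySem.List.sorted cards (fun c => c) true).take (min cnt.toNat cards.length) := by
        rw [List.take_eq_take_min, hlen]
      have hev' : (PySem.List.slice (PySem.List.sorted cards (fun c => c) true) none
          (some cnt)).sum % 2 = 0 := by rw [hsld, htake]; exact hev
      rw [pvA_even cards cnt hev', hsld, htake, hB, if_pos hev]
    · have hcle : cnt ≤ (cards.length : Int) := by
        by_contra hgt
        push_neg at hgt
        have hm : min cnt.toNat cards.length = cards.length := by omega
        rw [hm, List.take_of_length_le (by omega)] at hod
        rw [(PySem.List.sorted_perm cards (fun c => c) true).sum_eq] at hod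
        unfold Pre_maxmiumScore at hpre
        rw [pvModTwo] at hpre
        omega
      have hmin : min cnt.toNat cards.length = cnt.toNat := by omega
      rw [hmin] at hB hod
      rw [hB, if_neg (by omega), pvA_evalPos cards cnt h0 hcle hod]
      exact (pvCore _ _ hod).2
        (fun hc => hnd ((pvD_iffM cards cnt _ (by rw [if_neg (by omega)])).mpr hc))

theorem maxmiumScore_changed : Claim_changed_maxmiumScore := by unfold Claim_changed_maxmiumScore; decide

theorem maxmiumScore_tight : Claim_exact_maxmiumScore := by
  intro cards cnt hdom hpre hD
  have hlen : (PySem.List.sorted cards (fun c => c) true).length = cards.length :=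
    PySem.List.length_sorted cards (fun c => c) true
  rcases lt_or_ge cnt 0 with hneg | h0
  · have hc := (pvD_iffM cards cnt (cnt + cards.length).toNat (by rw [if_pos hneg])).mp hD
    have hod := hc.1
    have hslc := pvSliceToNeg cards cnt hneg
    have hKle : (cnt + cards.length).toNat ≤ cards.length := by omega
    have hmin : min (cnt + cards.length).toNat cards.length = (cnt + cards.length).toNat :=
      min_eq_left hKle
    have hB := pvB_evalK cards cnt (cnt + cards.length).toNat hslc
    rw [hmin] at hB
    rw [hB, if_neg (by omega), pvA_evalNeg cards cnt hneg hod]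
    have := (pvCore _ _ hod).1 hc
    omega
  · rcases lt_or_ge (cards.length : Int) cnt with hgt | hle
    · exfalso
      have hc := (pvD_iffM cards cnt cnt.toNat (by rw [if_neg (by omega)])).mp hD
      have hod := hc.1
      rw [List.take_of_length_le (by omega)] at hod
      rw [(PySem.List.sorted_perm cards (fun c => c) true).sum_eq] at hod
      unfold Pre_maxmiumScore at hpre
      rw [pvModTwo] at hpre
      omega
    · have hc := (pvD_iffM cards cnt cnt.toNat (by rw [if_neg (by omega)])).mp hD
      have hod := hc.1
      have hslc := PySem.List.slice_to cards h0
      have hmin : min cnt.toNat cards.length = cnt.toNat := by omega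
      have hB := pvB_evalK cards cnt cnt.toNat hslc
      rw [hmin] at hB
      rw [hB, if_neg (by omega), pvA_evalPos cards cnt h0 hle hod]
      have := (pvCore _ _ hod).1 hc
      omega
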